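-- pv_equiv track=rewrite | github.com/BruntonUWBio/NaturalisticNeuralManifolds | src/manifold_u.py | get_pa_comparison_names
-- ===== SOURCE A (Python) =====
-- def get_pa_comparison_names(
--     comparing_dim: dict, include_same_same: bool = False
-- ) -> dict:
--     """
--     Calculate names of pairwise comparisons based on comparing_dim
--     ie. left vs right, left vs left, right vs right, etc.
--     Assumes that the comparing dim is provided as a list or dict
--     Parameters
--     ----------
--     comparing_dim : dict
--         Dictionary or list for things to compare
--     Returns
--     -------
--     pa_comparison_names : dict
--         Dictionary of the names of pairwise comparisons, excluding self-comparisons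
--     """
--
--     # if dict, starts at 0
--     num_dim = len(comparing_dim)
--     vs_dict = {}
--     compare_i = 0
--     for i in range(num_dim):
--         for j in range(i, num_dim):
--             if i == j and not include_same_same:
--                 continue
--             vs_dict[compare_i] = str(comparing_dim[i]) + \
--                 " vs " + str(comparing_dim[j])
--             compare_i += 1
--
--     return vs_dict
-- ===== SOURCE B (Python) =====
-- def get_pa_comparison_names(
--     comparing_dim: dict, include_same_same: bool = False
-- ) -> dict:
--     # Consume a shrinking worklist: pop the front index, emit its whole row
--     # (optionally "x vs x" first, then "x vs t" against everything still in the
--     # worklist), repeat; number the collected rows at the very end.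
--     rest = list(range(len(comparing_dim)))
--     rows = []
--     while rest:
--         i = rest.pop(0)
--         if include_same_same:
--             rows.append(str(comparing_dim[i]) + " vs " + str(comparing_dim[i]))
--         rows.extend(str(comparing_dim[i]) + " vs " + str(comparing_dim[j]) for j in rest)
--     return dict(enumerate(rows))
-- ===== Notes on version B (the rewrite author's own statement) =====
-- stated objective: alternative
-- what changed: Replaces A's nested range loops with a running counter and a diagonal-skip continue by a shrinking worklist consumed with pop: each step emits one whole row (an optional head-vs-head prepend instead of the skip branch, then head vs every remaining element), and the rows are numbered once at the end with dict(enumerate(...)) instead of an incremented key counter.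
import Mathlib
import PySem

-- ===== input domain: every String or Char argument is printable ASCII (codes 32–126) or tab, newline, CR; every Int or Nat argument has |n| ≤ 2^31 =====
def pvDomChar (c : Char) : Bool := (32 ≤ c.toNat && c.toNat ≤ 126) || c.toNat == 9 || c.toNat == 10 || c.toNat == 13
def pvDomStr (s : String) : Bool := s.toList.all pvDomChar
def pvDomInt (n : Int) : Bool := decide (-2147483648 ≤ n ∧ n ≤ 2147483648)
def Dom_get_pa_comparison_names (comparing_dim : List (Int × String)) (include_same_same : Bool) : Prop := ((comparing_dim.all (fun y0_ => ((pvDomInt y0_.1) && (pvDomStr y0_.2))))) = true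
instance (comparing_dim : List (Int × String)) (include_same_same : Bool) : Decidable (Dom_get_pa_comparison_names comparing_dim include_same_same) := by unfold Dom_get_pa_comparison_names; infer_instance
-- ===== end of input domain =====

-- B replaces A's nested range loops + counter + diagonal-skip `continue` by a shrinking
-- worklist consumed with pop (one whole row per step, diagonal as an optional prepend),
-- numbering the rows once at the end (objective: alternative, same cost).
-- Equivalence is about the RETURN value; neither version mutates its argument.

-- ===== PORT A =====
-- Literal port of A. `comparing_dim` (a Python dict) is the assoc list; Python's dict is
-- PySem.Dict.ofList of it. `d.getD i ""` stands for `comparing_dim[i]`; the default "" is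
-- reached only where Python would raise KeyError, and exactly those inputs are outside Pre_.
def get_pa_comparison_names (comparing_dim : List (Int × String)) (include_same_same : Bool) : List (Int × String) :=
  let d := PySem.Dict.ofList comparing_dim
  let num_dim : Int := d.size
  let st :=
    (PySem.List.pyRange 0 num_dim 1).foldl (fun (st : PySem.Dict Int String × Int) i =>
      (PySem.List.pyRange i num_dim 1).foldl (fun st j =>
        if i == j && !include_same_same then st
        else (st.1.insert st.2 (d.getD i "" ++ " vs " ++ d.getD j ""), st.2 + 1)) st)
      (PySem.Dict.empty, 0)
  st.1.items

-- ===== PORT B =====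
-- The while/pop worklist loop of Source B as structural recursion on the worklist: one whole
-- row per popped head (optional head-vs-head prepend, then head vs each remaining element).
def pvRows (d : PySem.Dict Int String) (inc : Bool) : List Int → List String
  | [] => []
  | i :: rest =>
      (if inc then [d.getD i "" ++ " vs " ++ d.getD i ""] else []) ++
      rest.map (fun j => d.getD i "" ++ " vs " ++ d.getD j "") ++ pvRows d inc rest

-- Literal port of B: worklist = list(range(len(d))), consume it with pvRows, then
-- dict(enumerate(rows)).
def get_pa_comparison_names_alt (comparing_dim : List (Int × String)) (include_same_same : Bool) : List (Int × String) :=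
  let d := PySem.Dict.ofList comparing_dim
  PySem.List.enumerate (pvRows d include_same_same (PySem.List.pyRange 0 d.size 1)) 0

-- ===== PRECONDITION & SPEC =====
-- Pre_ excludes exactly the inputs on which A raises KeyError: some i in range(len(dict)) is not a
-- key of the dict AND the loops actually index it, i.e. at least one pair is emitted (n ≥ 2, or
-- n ≥ 1 with include_same_same). B raises KeyError on the same inputs.
def Pre_get_pa_comparison_names (comparing_dim : List (Int × String)) (include_same_same : Bool) : Prop :=
  (!(decide (2 ≤ (PySem.Dict.ofList comparing_dim).size) ||
      (include_same_same && decide (1 ≤ (PySem.Dict.ofList comparing_dim).size))) ||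
    (List.range (PySem.Dict.ofList comparing_dim).size).all
      (fun i => (PySem.Dict.ofList comparing_dim).contains (i : Int))) = true
instance (comparing_dim : List (Int × String)) (include_same_same : Bool) : Decidable (Pre_get_pa_comparison_names comparing_dim include_same_same) := by unfold Pre_get_pa_comparison_names; infer_instance

def pvWitness_get_pa_comparison_names : (List (Int × String)) × Bool := ([(0, "left"), (1, "right")], false)

def Spec_get_pa_comparison_names (comparing_dim : List (Int × String)) (include_same_same : Bool) (out : List (Int × String)) : Prop := out = get_pa_comparison_names_alt comparing_dim include_same_same
instance (comparing_dim : List (Int × String)) (include_same_same : Bool) (out : List (Int × String)) : Decidable (Spec_get_pa_comparison_names comparing_dim include_same_same out) := by unfold Spec_get_pa_comparison_names; infer_instance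

-- ===== CLAIM (what is proved, stated in full; the proofs are below) =====
def Claim_equal_get_pa_comparison_names : Prop := ∀ (comparing_dim : List (Int × String)) (include_same_same : Bool), Dom_get_pa_comparison_names comparing_dim include_same_same → Pre_get_pa_comparison_names comparing_dim include_same_same → Spec_get_pa_comparison_names comparing_dim include_same_same (get_pa_comparison_names comparing_dim include_same_same)

-- ===== LEMMAS AND PROOFS =====

theorem hfresh1 (S : List String) : (PySem.Dict.mk (PySem.List.enumerate S 0)).contains ((S.length : Int)) = false := by
  rw [← Bool.not_eq_true, PySem.Dict.contains_iff_mem_keys]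
  simp only [PySem.Dict.keys, PySem.List.map_fst_enumerate, PySem.List.mem_pyRange_one]
  omega

theorem fold_ins_eq (L S : List String) :
    L.foldl (fun (st : PySem.Dict Int String × Int) v => (st.1.insert st.2 v, st.2 + 1))
        (PySem.Dict.mk (PySem.List.enumerate S 0), (S.length : Int))
      = (PySem.Dict.mk (PySem.List.enumerate (S ++ L) 0), ((S ++ L).length : Int)) := by
  induction L generalizing S with
  | nil => simp
  | cons v L ih =>
      have hins : (PySem.Dict.mk (PySem.List.enumerate S 0)).insert ((S.length : Int)) v
          = PySem.Dict.mk (PySem.List.enumerate (S ++ [v]) 0) := by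
        apply PySem.Dict.ext
        rw [PySem.Dict.items_insert_of_not_contains _ _ (hfresh1 S)]
        simp [PySem.List.enumerate_append]
      have h2 := ih (S ++ [v])
      simp only [List.foldl_cons, hins]
      rw [show ((S.length : Int) + 1) = (((S ++ [v]).length : Nat) : Int) by simp]
      rw [h2]
      simp

theorem outer_fold_eq (strs : Int → List String) (I : List Int) (S : List String) :
    I.foldl (fun (st : PySem.Dict Int String × Int) i => (strs i).foldl
        (fun st v => (st.1.insert st.2 v, st.2 + 1)) st)
        (PySem.Dict.mk (PySem.List.enumerate S 0), (S.length : Int))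
      = (PySem.Dict.mk (PySem.List.enumerate (S ++ I.flatMap strs) 0),
         ((S ++ I.flatMap strs).length : Int)) := by
  induction I generalizing S with
  | nil => simp
  | cons i I ih =>
      simp only [List.foldl_cons, fold_ins_eq, ih (S ++ strs i)]
      simp

theorem A_fold (d : PySem.Dict Int String) (N : Int) (skip : Bool) :
    (((PySem.List.pyRange 0 N 1).foldl (fun (st : PySem.Dict Int String × Int) i =>
        (PySem.List.pyRange i N 1).foldl (fun st j =>
          if i == j && skip then st
          else (st.1.insert st.2 (d.getD i "" ++ " vs " ++ d.getD j ""), st.2 + 1)) st)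
        (PySem.Dict.empty, 0)).1).items
    = PySem.List.enumerate
        ((PySem.List.pyRange 0 N 1).flatMap (fun i =>
          (PySem.List.pyRange (i + (if skip then 1 else 0)) N 1).map
            (fun j => d.getD i "" ++ " vs " ++ d.getD j ""))) 0 := by
  have h0 : ((PySem.Dict.empty : PySem.Dict Int String), (0 : Int))
      = (PySem.Dict.mk (PySem.List.enumerate ([] : List String) 0), (([] : List String).length : Int)) := rfl
  have hcongr : ∀ i ∈ PySem.List.pyRange 0 N 1, ∀ (st : PySem.Dict Int String × Int),
      (PySem.List.pyRange i N 1).foldl (fun st j =>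
          if i == j && skip then st
          else (st.1.insert st.2 (d.getD i "" ++ " vs " ++ d.getD j ""), st.2 + 1)) st
      = ((PySem.List.pyRange (i + (if skip then 1 else 0)) N 1).map
            (fun j => d.getD i "" ++ " vs " ++ d.getD j "")).foldl
          (fun st v => (st.1.insert st.2 v, st.2 + 1)) st := by
    intro i hi st
    rw [PySem.List.mem_pyRange_one] at hi
    rw [List.foldl_map]
    cases skip with
    | false => simp
    | true =>
        rw [PySem.List.pyRange_one_cons hi.2, List.foldl_cons]
        simp only [BEq.rfl, Bool.and_self, if_true]
        apply PySem.List.foldl_congr_mem'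
        intro j hj st'
        rw [PySem.List.mem_pyRange_one] at hj
        have : (i == j) = false := by simp; omega
        simp [this]
  rw [PySem.List.foldl_congr_mem' _ _ _ ((PySem.Dict.empty : PySem.Dict Int String), (0 : Int)) hcongr, h0, outer_fold_eq]
  simp

-- B's worklist recursion produces exactly the row-concatenation A's loops enumerate.
theorem rows_pyRange (d : PySem.Dict Int String) (inc : Bool) (N : Int) :
    ∀ (k : Nat) (a : Int), (N - a).toNat = k →
    pvRows d inc (PySem.List.pyRange a N 1)
      = (PySem.List.pyRange a N 1).flatMap (fun i =>
          (PySem.List.pyRange (i + (if inc then 0 else 1)) N 1).map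
            (fun j => d.getD i "" ++ " vs " ++ d.getD j "")) := by
  intro k
  induction k with
  | zero =>
      intro a ha
      have : PySem.List.pyRange a N 1 = [] := by
        rw [PySem.List.pyRange_one, ha]; simp
      simp [this, pvRows]
  | succ k ih =>
      intro a ha
      have haN : a < N := by omega
      rw [PySem.List.pyRange_one_cons haN]
      have ih' := ih (a + 1) (by omega)
      simp only [pvRows, List.flatMap_cons, ih']
      cases inc with
      | true =>
          simp only [if_true, add_zero]
          rw [PySem.List.pyRange_one_cons haN]
          simp
      | false =>
          simp

theorem main_eq (comparing_dim : List (Int × String)) (include_same_same : Bool) :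
    get_pa_comparison_names comparing_dim include_same_same
      = get_pa_comparison_names_alt comparing_dim include_same_same := by
  simp only [get_pa_comparison_names, get_pa_comparison_names_alt]
  set d := PySem.Dict.ofList comparing_dim with hd
  rw [A_fold d (d.size : Int) (!include_same_same)]
  rw [rows_pyRange d include_same_same (d.size : Int) (((d.size : Int) - 0).toNat) 0 rfl]
  cases include_same_same <;> rfl

-- ===== VERDICT (by name: the statement is the Claim_ definition above) =====
theorem get_pa_comparison_names_spec : Claim_equal_get_pa_comparison_names := by
  intro comparing_dim include_same_same _ _
  exact main_eq comparing_dim include_same_same
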